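-- pv_equiv track=rewrite | github.com/avakilov/Applications_dsc259R | labs/lab01/lab.py | exploded_numbers
-- ===== SOURCE A (Python) =====
-- def exploded_numbers(ints, n):
--     exploded_lists = []
--
--     # Step 1: build exploded ranges
--     for x in ints:
--         exploded = list(range(x - n, x + n + 1))
--         exploded_lists.append(exploded)
--
--     # Step 2: compute max width across all numbers
--     max_width = 0
--     for lst in exploded_lists:
--         for num in lst:
--             max_width = max(max_width, len(str(num)))
--
--     # Step 3: format each exploded list as padded strings
--     result = []
--     for lst in exploded_lists:
--         padded = [str(num).zfill(max_width) for num in lst]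
--         result.append(" ".join(padded))
--
--     return result
--     ...
-- ===== SOURCE B (Python) =====
-- def exploded_numbers(ints, n):
--     if not ints:
--         return []
--     if n < 0:
--         return [""] * len(ints)
--     width = max(len(str(min(ints) - n)), len(str(max(ints) + n)))
--     return [" ".join(str(v).zfill(width) for v in range(x - n, x + n + 1))
--             for x in ints]
-- ===== Notes on version B (the rewrite author's own statement) =====
-- stated objective: alternative
-- what changed: B replaces A's three passes and stored list-of-lists (build all ranges, scan every generated number for the max str-width, then format) by a closed-form width computed from the two extreme range endpoints min(ints)-n and max(ints)+n, plus one formatting pass that builds each range on the fly.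
import Mathlib
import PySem

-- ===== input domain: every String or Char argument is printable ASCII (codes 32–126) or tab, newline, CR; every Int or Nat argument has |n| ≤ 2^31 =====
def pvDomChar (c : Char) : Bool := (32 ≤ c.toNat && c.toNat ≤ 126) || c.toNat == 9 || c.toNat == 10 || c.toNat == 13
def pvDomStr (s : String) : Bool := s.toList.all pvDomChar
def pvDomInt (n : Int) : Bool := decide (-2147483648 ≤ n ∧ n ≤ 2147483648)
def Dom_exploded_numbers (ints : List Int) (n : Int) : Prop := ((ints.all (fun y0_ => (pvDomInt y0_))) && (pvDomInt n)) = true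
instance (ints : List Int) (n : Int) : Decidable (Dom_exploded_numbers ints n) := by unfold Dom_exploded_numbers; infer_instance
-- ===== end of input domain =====

-- B computes the padding width in closed form from the two range endpoints of the extreme
-- elements instead of scanning every generated number; objective: alternative decomposition
-- (single pass, no stored list-of-lists).

-- ===== PORT A =====
def exploded_numbers (ints : List Int) (n : Int) : List String :=
  -- Step 1: build exploded ranges (loop appending list(range(x-n, x+n+1)))
  let exploded_lists : List (List Int) :=
    ints.foldl (fun acc x => acc ++ [PySem.List.pyRange (x - n) (x + n + 1) 1]) []
  -- Step 2: compute max width across all numbers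
  let max_width : Int :=
    exploded_lists.foldl
      (fun mw lst => lst.foldl (fun m num => max m (PySem.Str.len (PySem.Int.toStr num))) mw) 0
  -- Step 3: format each exploded list as padded strings
  exploded_lists.foldl
    (fun res lst =>
      res ++ [PySem.Str.join " "
        (lst.map (fun num => PySem.Str.zfill (PySem.Int.toStr num) max_width))]) []

-- ===== PORT B =====
def exploded_numbers_alt (ints : List Int) (n : Int) : List String :=
  if ints = [] then []
  else if n < 0 then List.replicate ints.length ""
  else
    match PySem.List.min? ints (fun x => x), PySem.List.max? ints (fun x => x) with
    | some mn, some mx =>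
      let width : Int :=
        max (PySem.Str.len (PySem.Int.toStr (mn - n))) (PySem.Str.len (PySem.Int.toStr (mx + n)))
      ints.map (fun x => PySem.Str.join " "
        ((PySem.List.pyRange (x - n) (x + n + 1) 1).map
          (fun v => PySem.Str.zfill (PySem.Int.toStr v) width)))
    | _, _ => []  -- unreachable: ints ≠ []

-- ===== PRECONDITION & SPEC =====
def Spec_exploded_numbers (ints : List Int) (n : Int) (out : List String) : Prop := out = exploded_numbers_alt ints n
instance (ints : List Int) (n : Int) (out : List String) : Decidable (Spec_exploded_numbers ints n out) := by unfold Spec_exploded_numbers; infer_instance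

-- ===== CLAIM (what is proved, stated in full; the proofs are below) =====
def Claim_equal_exploded_numbers : Prop := ∀ (ints : List Int) (n : Int), Dom_exploded_numbers ints n → Spec_exploded_numbers ints n (exploded_numbers ints n)

-- ===== LEMMAS AND PROOFS =====

-- append-folds are maps
lemma pvFoldlAppend {α β : Type} (f : α → β) :
    ∀ (l : List α) (acc : List β), l.foldl (fun a x => a ++ [f x]) acc = acc ++ l.map f
  | [], acc => by simp
  | x :: t, acc => by
      simp only [List.foldl, List.map]
      rw [pvFoldlAppend f t]
      simp

-- length of Nat.toDigits 10 is log₁₀ + 1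
lemma pvToDigitsCoreLen :
    ∀ (f n : Nat), n < f → (Nat.toDigitsCore 10 f n []).length = Nat.log 10 n + 1 := by
  intro f
  induction f with
  | zero => intro n h; omega
  | succ f ih =>
    intro n hn
    simp only [Nat.toDigitsCore]
    by_cases h : n / 10 = 0
    · have hlt : n < 10 := by omega
      simp [h, Nat.log_eq_zero_iff.mpr (Or.inl hlt)]
    · have hge : 10 ≤ n := by
        by_contra hlt
        exact h (Nat.div_eq_of_lt (by omega))
      have hdiv : n / 10 < f := by
        have : n / 10 < n := Nat.div_lt_self (by omega) (by omega)
        omega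
      simp only [h, if_false]
      rw [Nat.toDigitsCore_lens_eq, ih _ hdiv]
      have hpos : 0 < Nat.log 10 n := Nat.log_pos (by omega) hge
      have := Nat.log_div_base 10 n
      omega

lemma pvToDigitsLen (n : Nat) : (Nat.toDigits 10 n).length = Nat.log 10 n + 1 :=
  pvToDigitsCoreLen (n + 1) n (Nat.lt_succ_self n)

-- character count of str(v)
def pvLen (v : Int) : Nat := (PySem.Int.toChars v).length

lemma pvLenEq (v : Int) :
    pvLen v = if v < 0 then Nat.log 10 v.natAbs + 2 else Nat.log 10 v.toNat + 1 := by
  by_cases h : v < 0 <;> simp [pvLen, PySem.Int.toChars, h, pvToDigitsLen]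

lemma pvLenI (v : Int) : PySem.Str.len (PySem.Int.toStr v) = (pvLen v : Int) := by
  simp [PySem.Str.len, PySem.Int.toList_toStr, pvLen]

-- a number between two bounds never needs more characters than one of the bounds
lemma pvLenBound (lo hi v : Int) (h1 : lo ≤ v) (h2 : v ≤ hi) :
    pvLen v ≤ max (pvLen lo) (pvLen hi) := by
  by_cases hv : v < 0
  · have hlo : lo < 0 := by omega
    have habs : v.natAbs ≤ lo.natAbs := by omega
    have := Nat.log_mono_right (b := 10) habs
    rw [pvLenEq v, pvLenEq lo] at *
    simp only [hv, hlo, if_true] at *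
    exact le_max_of_le_left (by omega)
  · have hhi : ¬ hi < 0 := by omega
    have htn : v.toNat ≤ hi.toNat := by omega
    have := Nat.log_mono_right (b := 10) htn
    rw [pvLenEq v, pvLenEq hi] at *
    simp only [hv, hhi, if_false] at *
    exact le_max_of_le_right (by omega)

-- running-max fold over one list
lemma pvLeFold (f : Int → Int) :
    ∀ (l : List Int) (a : Int), a ≤ l.foldl (fun m v => max m (f v)) a
  | [], a => le_refl a
  | x :: t, a => le_trans (le_max_left a (f x)) (pvLeFold f t _)

lemma pvMemLeFold (f : Int → Int) :
    ∀ (l : List Int) (a v : Int), v ∈ l → f v ≤ l.foldl (fun m v => max m (f v)) a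
  | x :: t, a, v, h => by
      rcases List.mem_cons.mp h with h | h
      · subst h
        exact le_trans (le_max_right a (f v)) (pvLeFold f t _)
      · exact pvMemLeFold f t _ v h

lemma pvFoldLe (f : Int → Int) :
    ∀ (l : List Int) (a w : Int), a ≤ w → (∀ v ∈ l, f v ≤ w) →
      l.foldl (fun m v => max m (f v)) a ≤ w
  | [], a, w, ha, _ => ha
  | x :: t, a, w, ha, hl => by
      refine pvFoldLe f t _ w ?_ (fun v hv => hl v (List.mem_cons_of_mem _ hv))
      exact max_le ha (hl x List.mem_cons_self)

-- the same for the nested fold of step 2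
lemma pvLeFold2 (f : Int → Int) :
    ∀ (G : List (List Int)) (a : Int),
      a ≤ G.foldl (fun mw lst => lst.foldl (fun m v => max m (f v)) mw) a
  | [], a => le_refl a
  | l :: t, a => le_trans (pvLeFold f l a) (pvLeFold2 f t _)

lemma pvMemLeFold2 (f : Int → Int) :
    ∀ (G : List (List Int)) (a : Int) (lst : List Int) (v : Int), lst ∈ G → v ∈ lst →
      f v ≤ G.foldl (fun mw lst => lst.foldl (fun m v => max m (f v)) mw) a
  | l :: t, a, lst, v, hG, hv => by
      rcases List.mem_cons.mp hG with h | h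
      · subst h
        exact le_trans (pvMemLeFold f lst a v hv) (pvLeFold2 f t _)
      · exact pvMemLeFold2 f t _ lst v h hv

lemma pvFold2Le (f : Int → Int) :
    ∀ (G : List (List Int)) (a w : Int), a ≤ w → (∀ lst ∈ G, ∀ v ∈ lst, f v ≤ w) →
      G.foldl (fun mw lst => lst.foldl (fun m v => max m (f v)) mw) a ≤ w
  | [], a, w, ha, _ => ha
  | l :: t, a, w, ha, hG => by
      refine pvFold2Le f t _ w ?_ (fun lst h => hG lst (List.mem_cons_of_mem _ h))
      exact pvFoldLe f l a w ha (hG l List.mem_cons_self)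

-- ===== VERDICT (by name: the statement is the Claim_ definition above) =====
theorem exploded_numbers_spec : Claim_equal_exploded_numbers := by
  intro ints n _dom
  unfold Spec_exploded_numbers exploded_numbers exploded_numbers_alt
  set lenI : Int → Int := fun v => PySem.Str.len (PySem.Int.toStr v) with hlenI
  rw [pvFoldlAppend, List.nil_append, pvFoldlAppend, List.nil_append]
  by_cases hnil : ints = []
  · simp [hnil]
  · simp only [hnil, if_false]
    by_cases hneg : n < 0
    · -- every range is empty
      have hr : ∀ x : Int, PySem.List.pyRange (x - n) (x + n + 1) 1 = [] := fun x =>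
        PySem.List.pyRange_one_eq_nil (by omega)
      simp only [hneg, if_true]
      simp [hr, List.map_const', PySem.Str.join, PySem.Chars.join, List.intercalate]
    · -- ints nonempty, n ≥ 0
      simp only [hneg, if_false]
      obtain ⟨mn, hmn⟩ : ∃ m, PySem.List.min? ints (fun x => x) = some m := by
        cases h : PySem.List.min? ints (fun x => x) with
        | none => exact absurd ((PySem.List.min?_eq_none_iff _ _).mp h) hnil
        | some m => exact ⟨m, rfl⟩
      obtain ⟨mx, hmx⟩ : ∃ m, PySem.List.max? ints (fun x => x) = some m := by
        cases h : PySem.List.max? ints (fun x => x) with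
        | none => exact absurd ((PySem.List.max?_eq_none_iff _ _).mp h) hnil
        | some m => exact ⟨m, rfl⟩
      rw [hmn, hmx]
      have hmnm : mn ∈ ints := PySem.List.min?_mem hmn
      have hmxm : mx ∈ ints := PySem.List.max?_mem hmx
      have hmin : ∀ y ∈ ints, mn ≤ y := PySem.List.min?_isMin hmn
      have hmax : ∀ y ∈ ints, y ≤ mx := PySem.List.max?_isMax hmx
      -- A's max_width equals B's closed-form width
      have hw : (ints.map (fun x => PySem.List.pyRange (x - n) (x + n + 1) 1)).foldl
            (fun mw lst => lst.foldl (fun m num => max m (lenI num)) mw) 0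
          = max (lenI (mn - n)) (lenI (mx + n)) := by
        apply le_antisymm
        · apply pvFold2Le
          · rw [hlenI]
            simp only [pvLenI]
            exact le_max_of_le_left (by positivity)
          · intro lst hlst v hv
            rcases List.mem_map.mp hlst with ⟨x, hx, rfl⟩
            rcases PySem.List.mem_pyRange_one.mp hv with ⟨h1, h2⟩
            have hb := pvLenBound (mn - n) (mx + n) v
              (by have := hmin x hx; omega) (by have := hmax x hx; omega)
            rw [hlenI]; simp only [pvLenI]
            rcases max_cases (pvLen (mn - n)) (pvLen (mx + n)) with ⟨he, _⟩ | ⟨he, _⟩ <;>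
              rw [he] at hb <;> [exact le_max_of_le_left (by exact_mod_cast hb);
                exact le_max_of_le_right (by exact_mod_cast hb)]
        · apply max_le
          · exact pvMemLeFold2 lenI _ 0 _ (mn - n)
              (List.mem_map.mpr ⟨mn, hmnm, rfl⟩)
              (PySem.List.mem_pyRange_one.mpr ⟨le_refl _, by omega⟩)
          · exact pvMemLeFold2 lenI _ 0 _ (mx + n)
              (List.mem_map.mpr ⟨mx, hmxm, rfl⟩)
              (PySem.List.mem_pyRange_one.mpr ⟨by omega, by omega⟩)
      rw [hw, List.map_map]
      rfl
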